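/- GENERATED by farm/mkstatement.py from design/units.tsv (unit `GifFreeExtensions.2`) and the assertions of Gif/Spec/Seg_GifFreeExtensions.lean — do not edit.
   THE STATEMENT of the proof unit `GifFreeExtensions.2`: segment 2 of `GifFreeExtensions` (29 instructions; entries 0x107dd9;
   exits 0x107dd9,ret; ranges 0x107dc3-0x107e32)
   takes each of its entry assertions to one of its exit assertions (`Gif.Spec.GifFreeExtensions.Seg2`), given the contracts of its callees.
   What the names mean: ProgX/Base/Spec/Basic.lean (the shared hypotheses), Gif/Spec/Seg_GifFreeExtensions.lean (the assertions). The theorem to prove: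
   `theorem GifFreeExtensions_2_ok : Gif.Spec.GifFreeExtensions_2.Statement`. -/
import Gif.Code
import Gif.Dec.All
import Gif.Labels
import Gif.Spec.Seg_GifFreeExtensions
import ProgX.Base.Spec.Heap
namespace Gif.Spec.GifFreeExtensions_2
open X86 X86.User Asan

/-- The statement of unit `GifFreeExtensions.2`. -/
def Statement : Prop :=
  ∀ (Lay : Layout) (_hLay : Lay.hi = 0x1000000) (μ : Microarch) (_hμ : UserX.MicroOK μ) (u₀ : State)
    (_hcode : HasCodeNat Lay u₀ Gif.L.GifFreeExtensions.entry Gif.Code.code_GifFreeExtensions.nat Gif.L.GifFreeExtensions.size)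
    (_h_free : ∀ (H : Heap) (rest : List Obj) (frames : List (Nat × FrameLayout)) (n : Nat), Calls Lay μ ProgX.Base.WayInv (ProgX.Base.conv u₀) ProgX.Base.L.free.entry (ProgX.Base.Spec.free.spec H rest frames n))
    (_h_asan_load8_noabort : Asan.SmallCheck Lay μ ProgX.Base.WayInv (ProgX.Base.CodeOK u₀) [.rax, .rcx, .rdx] 8 ProgX.Base.L.__asan_load8_noabort.entry)
    (_h_asan_load4_noabort : Asan.SmallCheck Lay μ ProgX.Base.WayInv (ProgX.Base.CodeOK u₀) [.rax, .rcx, .rdx] 4 ProgX.Base.L.__asan_load4_noabort.entry)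
    (_h_asan_store8_noabort : Asan.SmallCheck Lay μ ProgX.Base.WayInv (ProgX.Base.CodeOK u₀) [.rax, .rcx, .rdx] 8 ProgX.Base.L.__asan_store8_noabort.entry)
    (_h_asan_store4_noabort : Asan.SmallCheck Lay μ ProgX.Base.WayInv (ProgX.Base.CodeOK u₀) [.rax, .rcx, .rdx] 4 ProgX.Base.L.__asan_store4_noabort.entry),
    Gif.Spec.GifFreeExtensions.Seg2 Lay μ u₀

end Gif.Spec.GifFreeExtensions_2
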